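-- pv_equiv track=rewrite | github.com/DanyalAbbas/hackerrank | Compare_the_Triplets.py | foo
-- ===== SOURCE A (Python) =====
-- def foo(a : list, b : list):
--     values = [0,0]
--     for i in range(len(a)):
--         if a[i] > b[i]:
--             values[0] += 1
--         elif b[i] > a[i]:
--             values[1] += 1
--     return values
-- ===== SOURCE B (Python) =====
-- def foo(a : list, b : list):
--     return [sum(1 for i in range(len(a)) if a[i] > b[i]),
--             sum(1 for i in range(len(a)) if b[i] > a[i])]
-- ===== Notes on version B (the rewrite author's own statement) =====
-- stated objective: alternative
-- what changed: Replaces the single interleaved loop mutating a two-cell list with two independent one-condition reductions (counting comprehensions), one per tally.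
import Mathlib
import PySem

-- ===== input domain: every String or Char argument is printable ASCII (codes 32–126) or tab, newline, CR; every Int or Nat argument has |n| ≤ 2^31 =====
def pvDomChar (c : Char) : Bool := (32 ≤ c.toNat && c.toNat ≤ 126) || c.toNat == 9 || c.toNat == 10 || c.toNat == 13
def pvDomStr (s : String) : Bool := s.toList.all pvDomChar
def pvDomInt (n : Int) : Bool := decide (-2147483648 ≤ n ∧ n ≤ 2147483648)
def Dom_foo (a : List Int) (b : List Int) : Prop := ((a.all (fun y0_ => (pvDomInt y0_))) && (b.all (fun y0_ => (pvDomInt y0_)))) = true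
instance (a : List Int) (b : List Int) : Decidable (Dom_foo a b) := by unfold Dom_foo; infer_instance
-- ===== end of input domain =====

-- B replaces A's single interleaved loop over a mutable two-cell list with two
-- independent counting reductions, one per tally (objective: alternative decomposition).

-- ===== PORT A =====
-- one step of A's loop body; b[i] is exact under Pre_foo (a.length ≤ b.length keeps every index in range)
def fooStep (a : List Int) (b : List Int) (v : Int × Int) (i : Int) : Int × Int :=
  if (PySem.List.pyGet? a i).getD 0 > (PySem.List.pyGet? b i).getD 0 then (v.1 + 1, v.2)
  else if (PySem.List.pyGet? b i).getD 0 > (PySem.List.pyGet? a i).getD 0 then (v.1, v.2 + 1)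
  else v

def foo (a : List Int) (b : List Int) : List Int :=
  let values := (PySem.List.pyRange 0 (a.length : Int) 1).foldl (fooStep a b) (0, 0)
  [values.1, values.2]

-- ===== PORT B =====
def foo_alt (a : List Int) (b : List Int) : List Int :=
  let idxs := PySem.List.pyRange 0 (a.length : Int) 1
  [(idxs.countP (fun i => (PySem.List.pyGet? a i).getD 0 > (PySem.List.pyGet? b i).getD 0) : Int),
   (idxs.countP (fun i => (PySem.List.pyGet? b i).getD 0 > (PySem.List.pyGet? a i).getD 0) : Int)]

-- ===== PRECONDITION & SPEC =====
-- Pre_foo excludes len(a) > len(b), where both A and B raise IndexError on b[i]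
def Pre_foo (a : List Int) (b : List Int) : Prop := a.length ≤ b.length
instance (a : List Int) (b : List Int) : Decidable (Pre_foo a b) := by unfold Pre_foo; infer_instance
def pvWitness_foo : List Int × List Int := ([1, 2, 3], [3, 2, 1])
def Spec_foo (a : List Int) (b : List Int) (out : List Int) : Prop := out = foo_alt a b
instance (a : List Int) (b : List Int) (out : List Int) : Decidable (Spec_foo a b out) := by unfold Spec_foo; infer_instance

-- ===== CLAIM (what is proved, stated in full; the proofs are below) =====
def Claim_equal_foo : Prop := ∀ (a : List Int) (b : List Int), Dom_foo a b → Pre_foo a b → Spec_foo a b (foo a b)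

-- ===== LEMMAS AND PROOFS =====

-- A's fold over (x, y) is the pair of B's two counts, shifted by the accumulator
theorem foldl_fooStep (a b : List Int) (l : List Int) (x y : Int) :
    l.foldl (fooStep a b) (x, y) =
      (x + (l.countP (fun i => (PySem.List.pyGet? a i).getD 0 > (PySem.List.pyGet? b i).getD 0) : Int),
       y + (l.countP (fun i => (PySem.List.pyGet? b i).getD 0 > (PySem.List.pyGet? a i).getD 0) : Int)) := by
  induction l generalizing x y with
  | nil => simp
  | cons i l ih =>
    by_cases h1 : (PySem.List.pyGet? a i).getD 0 > (PySem.List.pyGet? b i).getD 0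
    · simp [fooStep, h1, lt_asymm h1, ih]; ring
    · by_cases h2 : (PySem.List.pyGet? b i).getD 0 > (PySem.List.pyGet? a i).getD 0
      · simp [fooStep, h1, h2, ih]; ring
      · simp [fooStep, h1, h2, ih]

theorem foo_spec : Claim_equal_foo := by
  intro a b _ _
  unfold Spec_foo foo foo_alt
  simp [foldl_fooStep]
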